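-- pv_equiv track=rewrite | github.com/pypi-data/pypi-mirror-182 | packages/ambulance_game/ambulance_game-0.0.7.tar.gz/ambulance_game-0.0.7/src/ambulance_game/markov/graphical.py | reset_L_and_R_in_array
-- ===== SOURCE A (Python) =====
-- def reset_L_and_R_in_array(edges, lefts):
--     """
--     Take an array and re-sorts the values in such a way such that:
--     - All "D" values remain in the exact same position
--     - In the remaining spaces, "L" and "R" are sorted starting from the left with
--     all "L"
--
--     Example
--     -----------
--     Input: [D, R, R, D, L, L, L]
--     Output: [D, L, L, D, L, R, R]
--     """
--
--     L_count = 0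
--     for pos, element in enumerate(edges):
--         reset_this_entry = element in ("L", "R")
--         if reset_this_entry and L_count < lefts:
--             edges[pos] = "L"
--             L_count += 1
--         elif reset_this_entry:
--             edges[pos] = "R"
--     return edges
-- ===== SOURCE B (Python) =====
-- def reset_L_and_R_in_array(edges, lefts):
--     slots = [pos for pos, element in enumerate(edges) if element in ("L", "R")]
--     for rank, pos in enumerate(slots):
--         edges[pos] = "L" if rank < lefts else "R"
--     return edges
-- ===== Notes on version B (the rewrite author's own statement) =====
-- stated objective: alternative
-- what changed: Replaces the counter-threaded conditional single pass with two passes: first build the list of indices holding 'L'/'R', then assign 'L' to the first `lefts` of those indices by rank and 'R' to the rest.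
import Mathlib
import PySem

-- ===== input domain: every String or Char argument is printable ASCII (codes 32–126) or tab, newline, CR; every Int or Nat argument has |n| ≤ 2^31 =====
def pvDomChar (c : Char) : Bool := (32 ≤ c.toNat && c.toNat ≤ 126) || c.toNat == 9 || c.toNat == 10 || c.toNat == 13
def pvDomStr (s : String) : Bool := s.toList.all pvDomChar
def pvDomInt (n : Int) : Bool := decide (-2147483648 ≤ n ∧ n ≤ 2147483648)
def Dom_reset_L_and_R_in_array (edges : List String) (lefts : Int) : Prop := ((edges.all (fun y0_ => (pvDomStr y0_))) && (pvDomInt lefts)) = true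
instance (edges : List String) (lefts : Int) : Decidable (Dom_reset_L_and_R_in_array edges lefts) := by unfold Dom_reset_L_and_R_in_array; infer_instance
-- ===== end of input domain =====

-- B builds the index table of 'L'/'R' slots first and assigns by rank instead of threading
-- a counter through a conditional pass (alternative decomposition; same return values; both
-- Pythons mutate `edges` in place and return it, so the proved equivalence is the return value).

-- ===== PORT A =====
def reset_L_and_R_in_array (edges : List String) (lefts : Int) : List String :=
  ((PySem.List.enumerate edges).foldl
    (fun st pe =>
      let resetThisEntry : Bool := pe.2 == "L" || pe.2 == "R"
      if resetThisEntry && decide (st.2 < lefts) then (st.1.set pe.1.toNat "L", st.2 + 1)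
      else if resetThisEntry then (st.1.set pe.1.toNat "R", st.2)
      else st)
    (edges, (0 : Int))).1

-- ===== PORT B =====
def reset_L_and_R_in_array_alt (edges : List String) (lefts : Int) : List String :=
  let slots := (PySem.List.enumerate edges).filterMap
    (fun pe => if pe.2 == "L" || pe.2 == "R" then some pe.1 else none)
  (PySem.List.enumerate slots).foldl
    (fun es ri => es.set ri.2.toNat (if ri.1 < lefts then "L" else "R"))
    edges

-- ===== PRECONDITION & SPEC =====
def Spec_reset_L_and_R_in_array (edges : List String) (lefts : Int) (out : List String) : Prop := out = reset_L_and_R_in_array_alt edges lefts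
instance (edges : List String) (lefts : Int) (out : List String) : Decidable (Spec_reset_L_and_R_in_array edges lefts out) := by unfold Spec_reset_L_and_R_in_array; infer_instance

-- ===== CLAIM (what is proved, stated in full; the proofs are below) =====
def Claim_equal_reset_L_and_R_in_array : Prop := ∀ (edges : List String) (lefts : Int), Dom_reset_L_and_R_in_array edges lefts → Spec_reset_L_and_R_in_array edges lefts (reset_L_and_R_in_array edges lefts)

-- ===== LEMMAS AND PROOFS =====

-- Reference recursion for A: counter increments only when an "L" is placed.
def pvGA (lefts : Int) : Int → List String → List String
  | _, [] => []
  | cnt, e :: es =>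
    if e == "L" || e == "R" then
      (if cnt < lefts then "L" :: pvGA lefts (cnt + 1) es else "R" :: pvGA lefts cnt es)
    else e :: pvGA lefts cnt es

-- Reference recursion for B: rank increments on every slot.
def pvGB (lefts : Int) : Int → List String → List String
  | _, [] => []
  | r, e :: es =>
    if e == "L" || e == "R" then
      (if r < lefts then "L" :: pvGB lefts (r + 1) es else "R" :: pvGB lefts (r + 1) es)
    else e :: pvGB lefts r es

theorem pvGB_sat (lefts : Int) (es : List String) :
    ∀ (c c' : Int), lefts ≤ c → lefts ≤ c' → pvGB lefts c es = pvGB lefts c' es := by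
  induction es with
  | nil => intro c c' _ _; rfl
  | cons e es ih =>
    intro c c' hc hc'
    simp only [pvGB]
    have h1 : ¬ c < lefts := by omega
    have h2 : ¬ c' < lefts := by omega
    by_cases hs : (e == "L" || e == "R") = true
    · simp [hs, h1, h2, ih (c + 1) (c' + 1) (by omega) (by omega)]
    · rw [Bool.not_eq_true] at hs
      simp [hs, ih c c' hc hc']

theorem pvGA_eq_pvGB (lefts : Int) (es : List String) :
    ∀ (c : Int), pvGA lefts c es = pvGB lefts c es := by
  induction es with
  | nil => intro c; rfl
  | cons e es ih =>
    intro c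
    simp only [pvGA, pvGB]
    by_cases hs : (e == "L" || e == "R") = true
    · by_cases hc : c < lefts
      · simp [hs, hc, ih]
      · have : lefts ≤ c := by omega
        simp [hs, hc, ih, pvGB_sat lefts es c (c + 1) this (by omega)]
    · simp [hs, ih]

theorem pvA_loop (lefts : Int) (suf : List String) :
    ∀ (pre : List String) (cnt : Int),
    ((PySem.List.enumerate suf (pre.length : Int)).foldl
      (fun st pe =>
        let resetThisEntry : Bool := pe.2 == "L" || pe.2 == "R"
        if resetThisEntry && decide (st.2 < lefts) then (st.1.set pe.1.toNat "L", st.2 + 1)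
        else if resetThisEntry then (st.1.set pe.1.toNat "R", st.2)
        else st)
      (pre ++ suf, cnt)).1 = pre ++ pvGA lefts cnt suf := by
  induction suf with
  | nil => intro pre cnt; simp [PySem.List.enumerate_nil, pvGA]
  | cons e es ih =>
    intro pre cnt
    rw [PySem.List.enumerate_cons]
    simp only [List.foldl_cons]
    have hset : ∀ v : String,
        (pre ++ e :: es).set ((pre.length : Int)).toNat v = (pre ++ [v]) ++ es := by
      intro v
      simp [List.append_assoc]
    by_cases hs : (e == "L" || e == "R") = true
    · by_cases hc : cnt < lefts
      · have hih := ih (pre ++ [("L" : String)]) (cnt + 1)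
        simp only [List.length_append, List.length_cons, List.length_nil] at hih
        push_cast at hih
        simp only [hs, hc, decide_true, Bool.and_true, if_true, hset]
        rw [hih]
        simp [pvGA, hs, hc]
      · have hih := ih (pre ++ [("R" : String)]) cnt
        simp only [List.length_append, List.length_cons, List.length_nil] at hih
        push_cast at hih
        simp only [hs, hc, decide_false, Bool.and_false, Bool.false_eq_true, if_false, if_true, hset]
        rw [hih]
        simp [pvGA, hs, hc]
    · rw [Bool.not_eq_true] at hs
      have hih := ih (pre ++ [e]) cnt
      simp only [List.length_append, List.length_cons, List.length_nil] at hih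
      push_cast at hih
      simp only [hs, Bool.false_and, Bool.false_eq_true, if_false]
      have hpe : pre ++ e :: es = (pre ++ [e]) ++ es := by simp
      rw [hpe, hih]
      simp [pvGA, hs]

theorem pvB_loop (lefts : Int) (suf : List String) :
    ∀ (pre : List String) (r : Int),
    (PySem.List.enumerate ((PySem.List.enumerate suf (pre.length : Int)).filterMap
        (fun pe => if pe.2 == "L" || pe.2 == "R" then some pe.1 else none)) r).foldl
      (fun es ri => es.set ri.2.toNat (if ri.1 < lefts then "L" else "R"))
      (pre ++ suf) = pre ++ pvGB lefts r suf := by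
  induction suf with
  | nil => intro pre r; simp [PySem.List.enumerate_nil, pvGB]
  | cons e es ih =>
    intro pre r
    rw [PySem.List.enumerate_cons]
    simp only [List.filterMap_cons]
    have hset : ∀ v : String,
        (pre ++ e :: es).set ((pre.length : Int)).toNat v = (pre ++ [v]) ++ es := by
      intro v
      simp [List.append_assoc]
    by_cases hs : (e == "L" || e == "R") = true
    · simp only [hs, if_true]
      rw [PySem.List.enumerate_cons]
      simp only [List.foldl_cons, hset]
      by_cases hr : r < lefts
      · have hih := ih (pre ++ [("L" : String)]) (r + 1)
        simp only [List.length_append, List.length_cons, List.length_nil] at hih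
        push_cast at hih
        simp only [hr, if_true]
        rw [hih]
        simp [pvGB, hs, hr]
      · have hih := ih (pre ++ [("R" : String)]) (r + 1)
        simp only [List.length_append, List.length_cons, List.length_nil] at hih
        push_cast at hih
        simp only [hr, if_false]
        rw [hih]
        simp [pvGB, hs, hr]
    · rw [Bool.not_eq_true] at hs
      simp only [hs, Bool.false_eq_true, if_false]
      have hih := ih (pre ++ [e]) r
      simp only [List.length_append, List.length_cons, List.length_nil] at hih
      push_cast at hih
      have hpe : pre ++ e :: es = (pre ++ [e]) ++ es := by simp
      rw [hpe, hih]
      simp [pvGB, hs]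

-- ===== VERDICT (by name: the statement is the Claim_ definition above) =====
theorem reset_L_and_R_in_array_spec : Claim_equal_reset_L_and_R_in_array := by
  intro edges lefts _
  unfold Spec_reset_L_and_R_in_array reset_L_and_R_in_array reset_L_and_R_in_array_alt
  have hA := pvA_loop lefts edges [] 0
  have hB := pvB_loop lefts edges [] 0
  simp only [List.nil_append, List.length_nil, Nat.cast_zero] at hA hB
  rw [hA, hB, pvGA_eq_pvGB]
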